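-- pv_equiv track=rewrite | github.com/gagandeep44489/DiscreteStrucutreAndAlgoApp | Divide and Conquer Algorithm Trainer.py | quick_sort_trace
-- ===== SOURCE A (Python) =====
-- def quick_sort_trace(arr):
--     trace = ["QUICK SORT TRACE", f"Original: {arr}", ""]
--
--     def quick_sort(items, depth=0):
--         indent = "  " * depth
--         if len(items) <= 1:
--             trace.append(f"{indent}Base case: {items}")
--             return items
--
--         pivot = items[-1]
--         left = [x for x in items[:-1] if x <= pivot]
--         right = [x for x in items[:-1] if x > pivot]
--         trace.append(
--             f"{indent}Pivot={pivot}, Left={left}, Right={right}, Recurse on both sides"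
--         )
--
--         return quick_sort(left, depth + 1) + [pivot] + quick_sort(right, depth + 1)
--
--     result = quick_sort(arr)
--     trace.extend(["", f"Sorted Result: {result}"])
--
--     summary = (
--         "Quick Sort Summary\n"
--         "- Strategy: Pick a pivot and partition into smaller and larger elements.\n"
--         "- Average Time Complexity: O(n log n).\n"
--         "- Worst-case Time Complexity: O(n^2), often due to bad pivot choices.\n"
--         "- Space Complexity: O(log n) average recursion stack.\n"
--         "- Strength: Typically very fast in practice."
--     )
--     return trace, summary
-- ===== SOURCE B (Python) =====
-- def quick_sort_trace(arr):
--     trace = ["QUICK SORT TRACE", f"Original: {arr}", ""]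
--     result = []
--     # explicit stack of frames: ("sort", items, depth) or ("emit", pivot, 0)
--     stack = [("sort", arr, 0)]
--     while stack:
--         kind, payload, depth = stack.pop()
--         if kind == "emit":
--             result.append(payload)
--             continue
--         items = payload
--         indent = "  " * depth
--         if len(items) <= 1:
--             trace.append(f"{indent}Base case: {items}")
--             result.extend(items)
--             continue
--         pivot = items[-1]
--         left = [x for x in items[:-1] if x <= pivot]
--         right = [x for x in items[:-1] if x > pivot]
--         trace.append(
--             f"{indent}Pivot={pivot}, Left={left}, Right={right}, Recurse on both sides"
--         )
--         stack.append(("sort", right, depth + 1))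
--         stack.append(("emit", pivot, 0))
--         stack.append(("sort", left, depth + 1))
--     trace.extend(["", f"Sorted Result: {result}"])
--     summary = (
--         "Quick Sort Summary\n"
--         "- Strategy: Pick a pivot and partition into smaller and larger elements.\n"
--         "- Average Time Complexity: O(n log n).\n"
--         "- Worst-case Time Complexity: O(n^2), often due to bad pivot choices.\n"
--         "- Space Complexity: O(log n) average recursion stack.\n"
--         "- Strength: Typically very fast in practice."
--     )
--     return trace, summary
-- ===== Notes on version B (the rewrite author's own statement) =====
-- stated objective: alternative
-- what changed: Replaces the recursive closure-mutating quicksort with an iterative loop over an explicit stack of sort/emit frames that produces the identical pre-order trace and assembles the sorted result left-to-right.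
import Mathlib
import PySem

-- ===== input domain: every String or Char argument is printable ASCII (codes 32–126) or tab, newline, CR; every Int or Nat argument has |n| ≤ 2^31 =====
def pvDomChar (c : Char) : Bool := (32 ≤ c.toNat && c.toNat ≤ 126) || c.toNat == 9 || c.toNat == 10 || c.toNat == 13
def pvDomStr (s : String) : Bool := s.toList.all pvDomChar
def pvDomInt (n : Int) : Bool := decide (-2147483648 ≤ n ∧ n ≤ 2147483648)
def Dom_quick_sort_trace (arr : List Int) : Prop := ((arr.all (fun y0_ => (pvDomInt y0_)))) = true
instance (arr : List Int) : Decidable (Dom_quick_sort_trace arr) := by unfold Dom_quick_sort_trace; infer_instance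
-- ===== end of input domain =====

-- B replaces the recursive, closure-mutating quicksort by an iterative loop over an
-- explicit stack of sort/emit frames producing the identical trace and result (alternative decomposition).


-- ===== PORT A =====

-- f"{xs}" for a Python list of ints: "[a, b, c]"
def pyReprIntList (xs : List Int) : String :=
  "[" ++ String.intercalate ", " (xs.map PySem.Int.toStr) ++ "]"

-- "  " * depth
def pyIndent (depth : Nat) : String := String.join (List.replicate depth "  ")

def pySummary : String :=
  "Quick Sort Summary\n- Strategy: Pick a pivot and partition into smaller and larger elements.\n- Average Time Complexity: O(n log n).\n- Worst-case Time Complexity: O(n^2), often due to bad pivot choices.\n- Space Complexity: O(log n) average recursion stack.\n- Strength: Typically very fast in practice."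

-- the inner recursive quick_sort; the closure's appends to `trace` are returned as the
-- first component (in append order), the Python return value is the second component
def qsA (items : List Int) (depth : Nat) : List String × List Int :=
  if items.length ≤ 1 then
    ([pyIndent depth ++ "Base case: " ++ pyReprIntList items], items)
  else
    let pivot := items.getLast?.getD 0          -- items[-1]; list is nonempty here
    let left := items.dropLast.filter (fun x => x ≤ pivot)
    let right := items.dropLast.filter (fun x => !(x ≤ pivot))
    let line := pyIndent depth ++ "Pivot=" ++ PySem.Int.toStr pivot ++ ", Left=" ++
      pyReprIntList left ++ ", Right=" ++ pyReprIntList right ++ ", Recurse on both sides"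
    let (tl, rl) := qsA left (depth + 1)
    let (tr, rr) := qsA right (depth + 1)
    (line :: (tl ++ tr), rl ++ [pivot] ++ rr)
termination_by items.length
decreasing_by
  · have := List.length_filter_le (fun x => decide (x ≤ items.getLast?.getD 0)) items.dropLast
    have h2 := items.length_dropLast; omega
  · have := List.length_filter_le (fun x => !decide (x ≤ items.getLast?.getD 0)) items.dropLast
    have h2 := items.length_dropLast; omega

def quick_sort_trace (arr : List Int) : List String × String :=
  let trace0 := ["QUICK SORT TRACE", "Original: " ++ pyReprIntList arr, ""]
  let res := qsA arr 0
  (trace0 ++ res.1 ++ ["", "Sorted Result: " ++ pyReprIntList res.2], pySummary)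

-- ===== PORT B =====

inductive PvFrame where
  | sort : List Int → Nat → PvFrame
  | emit : Int → PvFrame
deriving DecidableEq, Repr

def pvWeight : PvFrame → Nat
  | .sort xs _ => 3 ^ xs.length
  | .emit _ => 1

lemma pv_filter_split (p : Int → Bool) (xs : List Int) :
    (xs.filter p).length + (xs.filter (fun x => !p x)).length = xs.length := by
  induction xs with
  | nil => simp
  | cons a t ih => by_cases h : p a <;> simp [List.filter, h, ← ih] <;> omega

lemma pv_dec_core (l r S : Nat) (hlr : 1 ≤ l + r) : 3 ^ l + (1 + (3 ^ r + S)) < 3 ^ (l + r + 1) + S := by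
  have h1 : 3 ^ l ≤ 3 ^ (l + r) := Nat.pow_le_pow_right (by norm_num) (by omega)
  have h2 : 3 ^ r ≤ 3 ^ (l + r) := Nat.pow_le_pow_right (by norm_num) (by omega)
  have h3 : 3 ^ (l + r + 1) = 3 * 3 ^ (l + r) := by ring
  have h4 : 3 ≤ 3 ^ (l + r) := by
    calc 3 = 3 ^ 1 := by norm_num
    _ ≤ 3 ^ (l + r) := Nat.pow_le_pow_right (by norm_num) hlr
  omega

lemma pv_dec_main (p : Int → Bool) (xs : List Int) (S : Nat) (hxs : 1 ≤ xs.length) :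
    3 ^ (xs.filter p).length + (1 + (3 ^ (xs.filter (fun x => !p x)).length + S))
      < 3 ^ (xs.length + 1) + S := by
  rw [← pv_filter_split p xs]
  exact pv_dec_core _ _ _ (by rw [pv_filter_split p xs]; omega)

-- the while loop over the explicit stack
def loopB (stack : List PvFrame) (trace : List String) (result : List Int) :
    List String × List Int :=
  match stack with
  | [] => (trace, result)
  | .emit p :: rest => loopB rest trace (result ++ [p])
  | .sort items depth :: rest =>
    if h : items.length ≤ 1 then
      loopB rest (trace ++ [pyIndent depth ++ "Base case: " ++ pyReprIntList items])
        (result ++ items)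
    else
      let pivot := items.getLast?.getD 0
      let left := items.dropLast.filter (fun x => x ≤ pivot)
      let right := items.dropLast.filter (fun x => !(x ≤ pivot))
      let line := pyIndent depth ++ "Pivot=" ++ PySem.Int.toStr pivot ++ ", Left=" ++
        pyReprIntList left ++ ", Right=" ++ pyReprIntList right ++ ", Recurse on both sides"
      loopB (.sort left (depth + 1) :: .emit pivot :: .sort right (depth + 1) :: rest)
        (trace ++ [line]) result
termination_by (stack.map pvWeight).sum
decreasing_by
  all_goals simp only [List.map_cons, List.sum_cons, pvWeight]
  · omega
  · have : 1 ≤ 3 ^ items.length := Nat.one_le_pow _ _ (by norm_num)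
    omega
  · have hd : items.length = items.dropLast.length + 1 := by
      have := items.length_dropLast; omega
    rw [hd]
    exact pv_dec_main (fun x => decide (x ≤ items.getLast?.getD 0)) items.dropLast _ (by omega)

def quick_sort_trace_alt (arr : List Int) : List String × String :=
  let res := loopB [.sort arr 0] ["QUICK SORT TRACE", "Original: " ++ pyReprIntList arr, ""] []
  (res.1 ++ ["", "Sorted Result: " ++ pyReprIntList res.2], pySummary)

-- ===== PRECONDITION & SPEC =====
def Spec_quick_sort_trace (arr : List Int) (out : List String × String) : Prop := out = quick_sort_trace_alt arr
instance (arr : List Int) (out : List String × String) : Decidable (Spec_quick_sort_trace arr out) := by unfold Spec_quick_sort_trace; infer_instance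

-- ===== CLAIM (what is proved, stated in full; the proofs are below) =====
def Claim_equal_quick_sort_trace : Prop := ∀ (arr : List Int), Dom_quick_sort_trace arr → Spec_quick_sort_trace arr (quick_sort_trace arr)

-- ===== LEMMAS AND PROOFS =====

-- the loop invariant: popping a sort frame contributes exactly the recursion's trace and result
lemma loopB_sort (n : Nat) : ∀ (items : List Int), items.length ≤ n →
    ∀ (depth : Nat) (rest : List PvFrame) (trace : List String) (result : List Int),
    loopB (.sort items depth :: rest) trace result
      = loopB rest (trace ++ (qsA items depth).1) (result ++ (qsA items depth).2) := by
  induction n with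
  | zero =>
    intro items hlen depth rest trace result
    have : items = [] := List.eq_nil_of_length_eq_zero (by omega)
    subst this
    rw [loopB, qsA]; simp
  | succ n ih =>
    intro items hlen depth rest trace result
    by_cases h : items.length ≤ 1
    · rw [loopB, qsA]; simp [h]
    · rw [loopB, qsA]; simp only [h, if_false]
      set pivot := items.getLast?.getD 0 with hp
      set left := items.dropLast.filter (fun x => x ≤ pivot) with hl
      set right := items.dropLast.filter (fun x => !(x ≤ pivot)) with hr
      have hd : items.dropLast.length = items.length - 1 := items.length_dropLast
      have hll : left.length ≤ n := by
        have := List.length_filter_le (fun x => decide (x ≤ pivot)) items.dropLast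
        simp only [hl]; omega
      have hrl : right.length ≤ n := by
        have := List.length_filter_le (fun x => !decide (x ≤ pivot)) items.dropLast
        simp only [hr]; omega
      rw [ih left hll (depth + 1)]
      rw [loopB]
      rw [ih right hrl (depth + 1)]
      cases hA : qsA left (depth + 1) with
      | mk tl rl =>
        cases hB : qsA right (depth + 1) with
        | mk tr rr => simp

-- ===== VERDICT (by name: the statement is the Claim_ definition above) =====
theorem quick_sort_trace_spec : Claim_equal_quick_sort_trace := by
  intro arr _
  unfold Spec_quick_sort_trace quick_sort_trace quick_sort_trace_alt
  rw [loopB_sort arr.length arr (le_refl _) 0 [] _ []]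
  rw [loopB]
  simp
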